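-- pv_equiv track=rewrite | github.com/grabovszky/aoc2024 | solutions/day10/utils.py | find_reachable_peaks
-- ===== SOURCE A (Python) =====
-- from collections import deque
-- from typing import Dict, Set, Tuple
--
-- Point = Tuple[int, int]
--
-- Grid = Dict[Point, int]
--
-- DIRECTIONS = [(1, 0), (0, 1), (-1, 0), (0, -1)]
--
-- def get_neighbors(point: Point, height: int, grid: Grid) -> Set[Point]:
--     """Get valid neighbors that are exactly one height higher."""
--     row, col = point
--     neighbors = set()
--
--     for dr, dc in DIRECTIONS:
--         next_point = (row + dr, col + dc)
--         if grid.get(next_point) == height + 1: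
--             neighbors.add(next_point)
--
--     return neighbors
--
-- def find_reachable_peaks(start: Point, grid: Grid) -> Set[Point]:
--     """Find all height-9 points reachable from start (part 1)."""
--     peaks = set()
--     queue = deque([start])
--     seen = {start}
--
--     while queue:
--         current = queue.popleft()
--         current_height = grid[current]
--
--         if current_height == 9:
--             peaks.add(current)
--             continue
--
--         for neighbor in get_neighbors(current, current_height, grid):
--             if neighbor not in seen:
--                 seen.add(neighbor)
--                 queue.append(neighbor)
--
--     return peaks
-- ===== SOURCE B (Python) =====
-- DIRECTIONS = [(1, 0), (0, 1), (-1, 0), (0, -1)]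
--
-- def find_reachable_peaks(start, grid):
--     """Level-synchronous climb: every edge raises height by exactly one, so the
--     BFS frontier at step k holds exactly the reachable cells of height h0+k.
--     Climb level by level until height 9; the final frontier is the peak set."""
--     h = grid[start]
--     frontier = [start]
--     seen = {start}
--     while h < 9 and frontier:
--         nxt = []
--         for r, c in frontier:
--             for dr, dc in DIRECTIONS:
--                 p = (r + dr, c + dc)
--                 if p not in seen and grid.get(p) == h + 1:
--                     seen.add(p)
--                     nxt.append(p)
--         frontier = nxt
--         h += 1
--     return set(frontier) if h == 9 else set()
-- ===== Notes on version B (the rewrite author's own statement) =====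
-- stated objective: alternative
-- what changed: Replaces the generic BFS (deque + per-node height lookup + peak test at every dequeue) by a level-synchronous climb that exploits the +1-edge structure: a single height counter, one frontier list expanded whole-level-at-a-time until height 9, the final frontier being exactly the peak set.
import Mathlib
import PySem

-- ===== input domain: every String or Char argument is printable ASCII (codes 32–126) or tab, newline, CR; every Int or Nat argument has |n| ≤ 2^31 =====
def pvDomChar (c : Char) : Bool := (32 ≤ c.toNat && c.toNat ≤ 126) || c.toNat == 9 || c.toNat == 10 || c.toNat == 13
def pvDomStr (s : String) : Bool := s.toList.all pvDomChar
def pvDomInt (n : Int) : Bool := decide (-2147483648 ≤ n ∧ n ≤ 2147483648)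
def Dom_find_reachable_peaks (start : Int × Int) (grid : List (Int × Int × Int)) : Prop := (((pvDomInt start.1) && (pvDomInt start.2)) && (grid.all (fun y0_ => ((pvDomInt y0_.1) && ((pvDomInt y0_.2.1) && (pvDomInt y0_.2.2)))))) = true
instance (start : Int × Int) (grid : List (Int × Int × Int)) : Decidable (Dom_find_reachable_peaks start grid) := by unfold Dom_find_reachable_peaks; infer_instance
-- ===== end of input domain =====

-- B replaces A's generic BFS by a level-synchronous climb (one height counter, whole-frontier
-- expansion until height 9); equal return value proved on Pre_ (start present in the grid).

-- ===== PORT A =====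
-- dict lookup: grid is the Point->int dict as an association list (first match)
def gget (grid : List (Int × Int × Int)) (p : Int × Int) : Option Int :=
  match grid with
  | [] => none
  | (a, b, v) :: rest => if (a, b) = p then some v else gget rest p

def DIRECTIONS : List (Int × Int) := [(1, 0), (0, 1), (-1, 0), (0, -1)]

-- get_neighbors: builds the set of the four neighbours whose height is height+1
def get_neighbors (point : Int × Int) (height : Int) (grid : List (Int × Int × Int)) : List (Int × Int) :=
  DIRECTIONS.foldl (fun neighbors d =>
    if gget grid (point.1 + d.1, point.2 + d.2) = some (height + 1)
    then PySem.Set.add neighbors (point.1 + d.1, point.2 + d.2) else neighbors) []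

-- body of A's inner 'for neighbor in …: if neighbor not in seen: seen.add; queue.append'
def enqueue (st : List (Int × Int) × List (Int × Int)) (n : Int × Int) :
    List (Int × Int) × List (Int × Int) :=
  if n ∈ st.2 then st else (st.1 ++ [n], st.2 ++ [n])

-- ---- termination bookkeeping for the BFS loop (used only by decreasing_by) ----
def gridKeys (grid : List (Int × Int × Int)) : List (Int × Int) :=
  PySem.List.dedup (grid.map (fun t => (t.1, t.2.1)))

def unseenKeys (grid : List (Int × Int × Int)) (seen : List (Int × Int)) : Nat :=
  ((gridKeys grid).filter (fun k => decide (k ∉ seen))).length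

theorem gget_mem_keys {grid : List (Int × Int × Int)} {p : Int × Int} {v : Int}
    (h : gget grid p = some v) : p ∈ gridKeys grid := by
  simp only [gridKeys, PySem.List.dedup_eq_ofList, PySem.Set.mem_ofList, List.mem_map]
  induction grid with
  | nil => simp [gget] at h
  | cons t rest ih =>
    obtain ⟨a, b, w⟩ := t
    simp only [gget] at h
    by_cases hab : (a, b) = p
    · exact ⟨(a, b, w), by simp, hab⟩
    · simp only [hab, if_false] at h
      obtain ⟨t, ht, he⟩ := ih h
      exact ⟨t, by simp [ht], he⟩

theorem filter_unseen_cons {l s : List (Int × Int)} {p : Int × Int}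
    (hl : l.Nodup) (hp : p ∈ l) (hs : p ∉ s) :
    (l.filter (fun k => decide (k ∉ s ++ [p]))).length + 1
      = (l.filter (fun k => decide (k ∉ s))).length := by
  induction l with
  | nil => simp at hp
  | cons a l ih =>
    rcases List.nodup_cons.mp hl with ⟨hal, hln⟩
    rw [List.filter_cons, List.filter_cons]
    by_cases hap : a = p
    · subst hap
      have hcong : List.filter (fun k => decide (k ∉ s ++ [a])) l
          = List.filter (fun k => decide (k ∉ s)) l := by
        apply List.filter_congr
        intro k hk
        have hka : k ≠ a := fun he => hal (he ▸ hk)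
        simp [List.mem_append, hka]
      have h1 : decide (a ∉ s ++ [a]) = false := by simp
      have h2 : decide (a ∉ s) = true := by simp [hs]
      rw [h1, h2, hcong]
      simp
    · have hp' : p ∈ l := by
        rcases List.mem_cons.mp hp with h | h
        · exact absurd h.symm hap
        · exact h
      have hih := ih hln hp'
      have he : decide (a ∉ s ++ [p]) = decide (a ∉ s) := by
        have h2 : (a ∉ s ++ [p]) ↔ (a ∉ s) := by
          constructor
          · intro hmem hin; exact hmem (by simp [hin])
          · intro hmem hin
            rcases List.mem_append.mp hin with h | h
            · exact hmem h
            · exact hap (List.mem_singleton.mp h)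
        rw [decide_eq_decide]; exact h2
      rw [he]
      by_cases has : a ∈ s
      · have hd : decide (a ∉ s) = false := by simpa using has
        rw [hd]
        rw [if_neg (by simp), if_neg (by simp)]
        exact hih
      · have hd : decide (a ∉ s) = true := by simp [has]
        rw [hd, if_pos rfl, if_pos rfl]
        simp only [List.length_cons]
        omega

theorem mem_foldl_gn {grid : List (Int × Int × Int)} {c : Int × Int} {h : Int} :
    ∀ (l : List (Int × Int)) (acc : List (Int × Int)) (x : Int × Int),
      x ∈ l.foldl (fun neighbors d =>
        if gget grid (c.1 + d.1, c.2 + d.2) = some (h + 1)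
        then PySem.Set.add neighbors (c.1 + d.1, c.2 + d.2) else neighbors) acc →
      x ∈ acc ∨ gget grid x = some (h + 1) := by
  intro l
  induction l with
  | nil => intro acc x hx; exact Or.inl hx
  | cons d l ih =>
    intro acc x hx
    simp only [List.foldl_cons] at hx
    rcases ih _ x hx with hmem | hg
    · by_cases hc : gget grid (c.1 + d.1, c.2 + d.2) = some (h + 1)
      · simp only [hc, if_true, PySem.Set.add] at hmem
        split at hmem
        · exact Or.inl hmem
        · rcases List.mem_append.mp hmem with h1 | h1
          · exact Or.inl h1
          · right; simpa using (List.mem_singleton.mp h1) ▸ hc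
      · simp only [hc, if_false] at hmem
        exact Or.inl hmem
    · exact Or.inr hg

theorem get_neighbors_height {grid : List (Int × Int × Int)} {c : Int × Int} {h : Int}
    {x : Int × Int} (hx : x ∈ get_neighbors c h grid) : gget grid x = some (h + 1) := by
  rcases mem_foldl_gn DIRECTIONS [] x hx with h1 | h1
  · simp at h1
  · exact h1

theorem measure_fold {grid : List (Int × Int × Int)} :
    ∀ (ns : List (Int × Int)) (q s : List (Int × Int)),
      (∀ n ∈ ns, n ∈ gridKeys grid) →
      unseenKeys grid (ns.foldl enqueue (q, s)).2 + (ns.foldl enqueue (q, s)).1.length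
        ≤ unseenKeys grid s + q.length := by
  intro ns
  induction ns with
  | nil => intro q s _; simp
  | cons n ns ih =>
    intro q s hk
    simp only [List.foldl_cons]
    by_cases hns : n ∈ s
    · simp only [enqueue, hns, if_true]
      exact ih q s (fun m hm => hk m (by simp [hm]))
    · simp only [enqueue, hns, if_false]
      have h1 := ih (q ++ [n]) (s ++ [n]) (fun m hm => hk m (by simp [hm]))
      have h2 : unseenKeys grid (s ++ [n]) + 1 = unseenKeys grid s := by
        have hnk : n ∈ gridKeys grid := hk n (by simp)
        have hnd : (gridKeys grid).Nodup := by
          simp [gridKeys, PySem.List.dedup_eq_ofList, PySem.Set.nodup_ofList]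
        exact filter_unseen_cons hnd hnk hns
      simp only [List.length_append, List.length_cons, List.length_nil] at h1 ⊢
      omega

-- A's while-loop: peaks / queue / seen
def bfsLoop (grid : List (Int × Int × Int)) (peaks : List (Int × Int))
    (queue : List (Int × Int)) (seen : List (Int × Int)) : List (Int × Int) :=
  match queue with
  | [] => peaks
  | current :: rest =>
    match gget grid current with
    | none => peaks   -- Python raises KeyError here; unreachable from Pre_ (only keys are enqueued)
    | some h =>
      if h = 9 then bfsLoop grid (PySem.Set.add peaks current) rest seen
      else
        bfsLoop grid peaks
          ((get_neighbors current h grid).foldl enqueue (rest, seen)).1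
          ((get_neighbors current h grid).foldl enqueue (rest, seen)).2
termination_by unseenKeys grid seen + queue.length
decreasing_by
  · simp only [List.length_cons]; omega
  · have := measure_fold (grid := grid) (get_neighbors current h grid) rest seen
      (fun n hn => gget_mem_keys (get_neighbors_height hn))
    simp only [List.length_cons]
    omega

def find_reachable_peaks (start : Int × Int) (grid : List (Int × Int × Int)) : List (Int × Int) :=
  bfsLoop grid [] [start] [start]

-- ===== PORT B =====
-- one whole-frontier expansion at height h: state = (nxt, seen)
def climbStep (grid : List (Int × Int × Int)) (h : Int)
    (st : List (Int × Int) × List (Int × Int)) (rc : Int × Int) :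
    List (Int × Int) × List (Int × Int) :=
  DIRECTIONS.foldl (fun st2 d =>
    if (rc.1 + d.1, rc.2 + d.2) ∉ st2.2 ∧ gget grid (rc.1 + d.1, rc.2 + d.2) = some (h + 1)
    then (st2.1 ++ [(rc.1 + d.1, rc.2 + d.2)], st2.2 ++ [(rc.1 + d.1, rc.2 + d.2)])
    else st2) st

-- B's while-loop: climb one height level per round until 9
def climb (grid : List (Int × Int × Int)) (h : Int)
    (frontier seen : List (Int × Int)) : List (Int × Int) :=
  if h < 9 ∧ frontier ≠ [] then
    climb grid (h + 1) (frontier.foldl (climbStep grid h) ([], seen)).1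
      (frontier.foldl (climbStep grid h) ([], seen)).2
  else if h = 9 then PySem.Set.ofList frontier else []
termination_by (9 - h).toNat
decreasing_by omega

def find_reachable_peaks_alt (start : Int × Int) (grid : List (Int × Int × Int)) :
    List (Int × Int) :=
  match gget grid start with
  | none => []   -- Python raises KeyError here; outside Pre_
  | some h => climb grid h [start] [start]

-- ===== PRECONDITION & SPEC =====
-- Pre_ excludes exactly the inputs where Python A raises KeyError: start not a key of grid
def Pre_find_reachable_peaks (start : Int × Int) (grid : List (Int × Int × Int)) : Prop :=
  start ∈ grid.map (fun t => (t.1, t.2.1))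
instance (start : Int × Int) (grid : List (Int × Int × Int)) : Decidable (Pre_find_reachable_peaks start grid) := by unfold Pre_find_reachable_peaks; infer_instance

def pvWitness_find_reachable_peaks : (Int × Int) × (List (Int × Int × Int)) :=
  ((0, 0), [(0, 0, 9)])

def Spec_find_reachable_peaks (start : Int × Int) (grid : List (Int × Int × Int)) (out : List (Int × Int)) : Prop := out = find_reachable_peaks_alt start grid
instance (start : Int × Int) (grid : List (Int × Int × Int)) (out : List (Int × Int)) : Decidable (Spec_find_reachable_peaks start grid out) := by unfold Spec_find_reachable_peaks; infer_instance

-- ===== CLAIM (what is proved, stated in full; the proofs are below) =====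
def Claim_equal_find_reachable_peaks : Prop := ∀ (start : Int × Int) (grid : List (Int × Int × Int)), Dom_find_reachable_peaks start grid → Pre_find_reachable_peaks start grid → Spec_find_reachable_peaks start grid (find_reachable_peaks start grid)

-- ===== LEMMAS AND PROOFS =====

-- the four candidate neighbour cells of c, in DIRECTIONS order
def cands (c : Int × Int) : List (Int × Int) := DIRECTIONS.map (fun d => (c.1 + d.1, c.2 + d.2))

-- per-candidate step of B's expansion, over an explicit candidate point
def dstep (grid : List (Int × Int × Int)) (h : Int)
    (st : List (Int × Int) × List (Int × Int)) (n : Int × Int) :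
    List (Int × Int) × List (Int × Int) :=
  if n ∉ st.2 ∧ gget grid n = some (h + 1) then (st.1 ++ [n], st.2 ++ [n]) else st

-- the sublist of l kept by B's combined (unseen ∧ height) test, threading seen
def pick (grid : List (Int × Int × Int)) (h : Int) :
    List (Int × Int) → List (Int × Int) → List (Int × Int)
  | _, [] => []
  | s, n :: l =>
    if n ∉ s ∧ gget grid n = some (h + 1) then n :: pick grid h (s ++ [n]) l
    else pick grid h s l

-- the sublist of l kept by A's seen-test alone, threading seen
def pickSeen : List (Int × Int) → List (Int × Int) → List (Int × Int)
  | _, [] => []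
  | s, n :: l => if n ∈ s then pickSeen s l else n :: pickSeen (s ++ [n]) l

def deltaL (grid : List (Int × Int × Int)) (h : Int) (s : List (Int × Int)) (c : Int × Int) :
    List (Int × Int) := pick grid h s (cands c)

-- B's whole-frontier expansion result (the new frontier)
def Fr (grid : List (Int × Int × Int)) (h : Int) (s q : List (Int × Int)) : List (Int × Int) :=
  (q.foldl (climbStep grid h) ([], s)).1

theorem foldl_enqueue_eq (ns : List (Int × Int)) :
    ∀ (q s : List (Int × Int)),
      ns.foldl enqueue (q, s) = (q ++ pickSeen s ns, s ++ pickSeen s ns) := by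
  induction ns with
  | nil => intro q s; simp [pickSeen]
  | cons n ns ih =>
    intro q s
    by_cases hn : n ∈ s
    · simp only [List.foldl_cons, enqueue, hn, if_true, pickSeen, ih]
    · simp only [List.foldl_cons, enqueue, hn, if_false, pickSeen, ih]
      simp

theorem foldl_dstep_eq (grid : List (Int × Int × Int)) (h : Int) (l : List (Int × Int)) :
    ∀ (a s : List (Int × Int)),
      l.foldl (dstep grid h) (a, s) = (a ++ pick grid h s l, s ++ pick grid h s l) := by
  induction l with
  | nil => intro a s; simp [pick]
  | cons n l ih =>
    intro a s
    by_cases hc : n ∉ s ∧ gget grid n = some (h + 1)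
    · simp only [List.foldl_cons, dstep, hc, pick, ih]
      simp
    · simp only [List.foldl_cons, dstep, hc, if_false, pick, ih]

theorem climbStep_eq (grid : List (Int × Int × Int)) (h : Int)
    (st : List (Int × Int) × List (Int × Int)) (c : Int × Int) :
    climbStep grid h st c = (cands c).foldl (dstep grid h) st := by
  rw [cands, List.foldl_map]; rfl

theorem climbStep_pair (grid : List (Int × Int × Int)) (h : Int)
    (a s : List (Int × Int)) (c : Int × Int) :
    climbStep grid h (a, s) c = (a ++ deltaL grid h s c, s ++ deltaL grid h s c) := by
  rw [climbStep_eq, foldl_dstep_eq]; rfl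

theorem Fr_shape (grid : List (Int × Int × Int)) (h : Int) (q : List (Int × Int)) :
    ∀ (a s : List (Int × Int)),
      q.foldl (climbStep grid h) (a, s) = (a ++ Fr grid h s q, s ++ Fr grid h s q) := by
  induction q with
  | nil => intro a s; simp [Fr]
  | cons c q ih =>
    intro a s
    have hF : Fr grid h s (c :: q)
        = deltaL grid h s c ++ Fr grid h (s ++ deltaL grid h s c) q := by
      simp only [Fr, List.foldl_cons, climbStep_pair]
      rw [ih]
      simp [Fr]
    simp only [List.foldl_cons, climbStep_pair, ih, hF]
    simp

theorem Fr_cons (grid : List (Int × Int × Int)) (h : Int) (s : List (Int × Int))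
    (c : Int × Int) (q : List (Int × Int)) :
    Fr grid h s (c :: q) = deltaL grid h s c ++ Fr grid h (s ++ deltaL grid h s c) q := by
  simp only [Fr, List.foldl_cons, climbStep_pair]
  rw [Fr_shape]
  simp [Fr]

theorem cands_nodup (c : Int × Int) : (cands c).Nodup := by
  simp [cands, DIRECTIONS, Prod.ext_iff]

theorem foldl_setadd_filter (grid : List (Int × Int × Int)) (h : Int) :
    ∀ (l acc : List (Int × Int)), l.Nodup → (∀ n ∈ l, n ∉ acc) →
      l.foldl (fun ns n => if gget grid n = some (h + 1) then PySem.Set.add ns n else ns) acc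
        = acc ++ l.filter (fun n => decide (gget grid n = some (h + 1))) := by
  intro l
  induction l with
  | nil => intro acc _ _; simp
  | cons n l ih =>
    intro acc hnd hacc
    rcases List.nodup_cons.mp hnd with ⟨hnl, hld⟩
    simp only [List.foldl_cons, List.filter_cons]
    by_cases hg : gget grid n = some (h + 1)
    · have hna : n ∉ acc := hacc n (by simp)
      have hadd : PySem.Set.add acc n = acc ++ [n] := by simp [PySem.Set.add, hna]
      rw [if_pos hg, hadd, ih (acc ++ [n]) hld (by
        intro m hm
        simp only [List.mem_append, List.mem_singleton]
        rintro (hma | rfl)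
        · exact hacc m (by simp [hm]) hma
        · exact hnl hm)]
      simp [hg]
    · rw [if_neg hg, ih acc hld (fun m hm => hacc m (by simp [hm]))]
      simp [hg]

theorem get_neighbors_eq_filter (grid : List (Int × Int × Int)) (h : Int) (c : Int × Int) :
    get_neighbors c h grid
      = (cands c).filter (fun n => decide (gget grid n = some (h + 1))) := by
  have hmap : get_neighbors c h grid
      = (cands c).foldl
          (fun ns n => if gget grid n = some (h + 1) then PySem.Set.add ns n else ns) [] := by
    rw [cands, List.foldl_map]; rfl
  rw [hmap, foldl_setadd_filter grid h (cands c) [] (cands_nodup c) (by simp)]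
  simp

theorem pickSeen_filter_eq_pick (grid : List (Int × Int × Int)) (h : Int) (l : List (Int × Int)) :
    ∀ s, pickSeen s (l.filter (fun n => decide (gget grid n = some (h + 1)))) = pick grid h s l := by
  induction l with
  | nil => intro s; simp [pickSeen, pick]
  | cons n l ih =>
    intro s
    simp only [List.filter_cons]
    by_cases hg : gget grid n = some (h + 1)
    · rw [if_pos (show decide (gget grid n = some (h + 1)) = true by simp [hg])]
      by_cases hn : n ∈ s
      · simp only [pickSeen, pick]
        rw [if_pos hn, if_neg (fun hc => hc.1 hn), ih s]
      · simp only [pickSeen, pick]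
        rw [if_neg hn, if_pos ⟨hn, hg⟩, ih (s ++ [n])]
    · have hd : decide (gget grid n = some (h + 1)) = false := by simp [hg]
      rw [hd, if_neg (by simp)]
      simp only [pick]
      rw [if_neg (by simp [hg]), ih s]

theorem pick_spec (grid : List (Int × Int × Int)) (h : Int) (l : List (Int × Int)) :
    ∀ s, (pick grid h s l).Nodup ∧
      ∀ x ∈ pick grid h s l, x ∉ s ∧ gget grid x = some (h + 1) := by
  induction l with
  | nil => intro s; simp [pick]
  | cons n l ih =>
    intro s
    by_cases hc : n ∉ s ∧ gget grid n = some (h + 1)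
    · simp only [pick, hc]
      rcases ih (s ++ [n]) with ⟨hnd, hmem⟩
      constructor
      · refine List.nodup_cons.mpr ⟨fun hn => ?_, hnd⟩
        exact (hmem n hn).1 (by simp)
      · intro x hx
        rcases List.mem_cons.mp hx with rfl | hx
        · exact ⟨hc.1, hc.2⟩
        · have := hmem x hx
          refine ⟨fun hxs => this.1 (by simp [hxs]), this.2⟩
    · simp only [pick, hc, if_false]
      exact ih s

theorem Fr_spec (grid : List (Int × Int × Int)) (h : Int) (q : List (Int × Int)) :
    ∀ s, (Fr grid h s q).Nodup ∧ ∀ x ∈ Fr grid h s q, x ∉ s ∧ gget grid x = some (h + 1) := by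
  induction q with
  | nil => intro s; simp [Fr]
  | cons c q ih =>
    intro s
    rw [Fr_cons]
    rcases pick_spec grid h (cands c) s with ⟨hdn, hdm⟩
    rcases ih (s ++ deltaL grid h s c) with ⟨hFn, hFm⟩
    constructor
    · refine List.Nodup.append hdn hFn ?_
      intro x hxd hxF
      exact (hFm x hxF).1 (by simp only [List.mem_append]; exact Or.inr hxd)
    · intro x hx
      rcases List.mem_append.mp hx with hx | hx
      · exact hdm x hx
      · have := hFm x hx
        refine ⟨fun hxs => this.1 (by simp [hxs]), this.2⟩

theorem foldl_enqueue_pair (grid : List (Int × Int × Int)) (h : Int)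
    (c : Int × Int) (q s : List (Int × Int)) :
    (get_neighbors c h grid).foldl enqueue (q, s)
      = (q ++ deltaL grid h s c, s ++ deltaL grid h s c) := by
  rw [foldl_enqueue_eq, get_neighbors_eq_filter, pickSeen_filter_eq_pick]
  rfl

theorem bfs_level9 (grid : List (Int × Int × Int)) (q : List (Int × Int)) :
    ∀ (nxt peaks seen : List (Int × Int)),
      (∀ x ∈ q, gget grid x = some 9) → q.Nodup → (∀ x ∈ q, x ∉ peaks) →
      bfsLoop grid peaks (q ++ nxt) seen = bfsLoop grid (peaks ++ q) nxt seen := by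
  induction q with
  | nil => intro nxt peaks seen _ _ _; simp
  | cons c q ih =>
    intro nxt peaks seen hh hnd hnp
    have hc : gget grid c = some 9 := hh c (by simp)
    have hcp : c ∉ peaks := hnp c (by simp)
    rw [List.cons_append, bfsLoop, hc]
    simp only [reduceIte]
    have hadd : PySem.Set.add peaks c = peaks ++ [c] := by simp [PySem.Set.add, hcp]
    rw [hadd, ih nxt (peaks ++ [c]) seen (fun x hx => hh x (by simp [hx]))
      (List.nodup_cons.mp hnd).2 ?_]
    · simp
    · intro x hx
      simp only [List.mem_append, List.mem_singleton]
      rintro (hxp | rfl)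
      · exact hnp x (by simp [hx]) hxp
      · exact (List.nodup_cons.mp hnd).1 hx

theorem bfs_level_ne (grid : List (Int × Int × Int)) (h : Int) (hne : h ≠ 9)
    (q : List (Int × Int)) :
    ∀ (nxt seen peaks : List (Int × Int)),
      (∀ x ∈ q, gget grid x = some h) →
      bfsLoop grid peaks (q ++ nxt) seen
        = bfsLoop grid peaks (nxt ++ Fr grid h seen q) (seen ++ Fr grid h seen q) := by
  induction q with
  | nil => intro nxt seen peaks _; simp [Fr]
  | cons c q ih =>
    intro nxt seen peaks hh
    have hc : gget grid c = some h := hh c (by simp)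
    rw [List.cons_append, bfsLoop, hc]
    simp only [if_neg hne]
    rw [foldl_enqueue_pair]
    have hq : (q ++ nxt) ++ deltaL grid h seen c = q ++ (nxt ++ deltaL grid h seen c) := by
      simp
    rw [hq, ih (nxt ++ deltaL grid h seen c) (seen ++ deltaL grid h seen c) peaks
      (fun x hx => hh x (by simp [hx]))]
    rw [Fr_cons]
    simp

theorem climb_unfold (grid : List (Int × Int × Int)) (h : Int)
    (frontier seen : List (Int × Int)) :
    climb grid h frontier seen =
      if h < 9 ∧ frontier ≠ [] then
        climb grid (h + 1) (frontier.foldl (climbStep grid h) ([], seen)).1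
          (frontier.foldl (climbStep grid h) ([], seen)).2
      else if h = 9 then PySem.Set.ofList frontier else [] := by
  rw [climb]

theorem sync (grid : List (Int × Int × Int)) (n : Nat) :
    ∀ (h : Int) (frontier seen : List (Int × Int)), h = 9 - (n : Int) →
      (∀ x ∈ frontier, gget grid x = some h) → frontier.Nodup →
      bfsLoop grid [] frontier seen = climb grid h frontier seen := by
  induction n with
  | zero =>
    intro h frontier seen hn hh hnd
    have h9 : h = 9 := by omega
    subst h9
    rw [climb_unfold]
    rw [if_neg (show ¬((9:Int) < 9 ∧ frontier ≠ []) from by simp), if_pos rfl]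
    have := bfs_level9 grid frontier [] [] seen hh hnd (by simp)
    simp only [List.append_nil] at this
    rw [this, bfsLoop]
    simp [PySem.Set.ofList_eq_self_of_nodup frontier hnd]
  | succ n ih =>
    intro h frontier seen hn hh hnd
    have hlt : h < 9 := by omega
    have hne : h ≠ 9 := by omega
    rcases frontier with _ | ⟨c, q⟩
    · rw [climb_unfold]
      simp [hne, bfsLoop]
    · rw [climb_unfold, if_pos ⟨hlt, by simp⟩, Fr_shape]
      have hA := bfs_level_ne grid h hne (c :: q) [] seen [] hh
      simp only [List.append_nil, List.nil_append] at hA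
      rw [hA]
      rcases Fr_spec grid h (c :: q) seen with ⟨hFn, hFm⟩
      exact ih (h + 1) (Fr grid h seen (c :: q)) (seen ++ Fr grid h seen (c :: q))
        (by omega) (fun x hx => (hFm x hx).2) hFn

theorem bfs_high (grid : List (Int × Int × Int)) :
    ∀ (peaks queue seen : List (Int × Int)),
      (∀ x ∈ queue, ∃ hx, gget grid x = some hx ∧ 9 < hx) →
      bfsLoop grid peaks queue seen = peaks := by
  intro peaks queue seen
  induction peaks, queue, seen using bfsLoop.induct grid with
  | case1 peaks seen => intro _; rw [bfsLoop]
  | case2 peaks seen current rest hnone =>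
    intro hq
    rcases hq current (by simp) with ⟨hx, hgx, _⟩
    rw [hgx] at hnone
    exact absurd hnone (by simp)
  | case3 peaks seen current rest hsome ih =>
    intro hq
    rcases hq current (by simp) with ⟨hx, hgx, hxgt⟩
    rw [hgx] at hsome
    have := Option.some.inj hsome
    omega
  | case4 peaks seen current rest h hsome h9 ih =>
    intro hq
    rw [bfsLoop, hsome]
    simp only [if_neg h9]
    apply ih
    intro x hx
    rw [foldl_enqueue_pair] at hx
    simp only at hx
    rcases List.mem_append.mp hx with hx | hx
    · exact hq x (by simp [hx])
    · rcases pick_spec grid h (cands current) seen with ⟨_, hdm⟩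
      refine ⟨h + 1, (hdm x hx).2, ?_⟩
      rcases hq current (by simp) with ⟨hx', hgx, hxgt⟩
      rw [hgx] at hsome
      have := Option.some.inj hsome
      omega

theorem mem_map_gget (grid : List (Int × Int × Int)) (p : Int × Int)
    (h : p ∈ grid.map (fun t => (t.1, t.2.1))) : ∃ v, gget grid p = some v := by
  induction grid with
  | nil => simp at h
  | cons t rest ih =>
    obtain ⟨a, b, w⟩ := t
    by_cases hab : (a, b) = p
    · exact ⟨w, by simp [gget, hab]⟩
    · have : p ∈ rest.map (fun t => (t.1, t.2.1)) := by
        rcases List.mem_map.mp h with ⟨u, hu, he⟩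
        rcases List.mem_cons.mp hu with rfl | hu
        · exact absurd he hab
        · exact List.mem_map.mpr ⟨u, hu, he⟩
      rcases ih this with ⟨v, hv⟩
      exact ⟨v, by simp [gget, hab, hv]⟩

-- ===== VERDICT (by name: the statement is the Claim_ definition above) =====
theorem find_reachable_peaks_spec : Claim_equal_find_reachable_peaks := by
  intro start grid _ hpre
  unfold Spec_find_reachable_peaks find_reachable_peaks find_reachable_peaks_alt
  rcases mem_map_gget grid start hpre with ⟨h, hg⟩
  rw [hg]
  show bfsLoop grid [] [start] [start] = climb grid h [start] [start]
  by_cases hle : h ≤ 9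
  · have hcast : h = 9 - ((9 - h).toNat : Int) := by omega
    exact sync grid (9 - h).toNat h [start] [start] hcast
      (by intro x hx; rcases List.mem_singleton.mp hx with rfl; exact hg) (by simp)
  · have hA : bfsLoop grid [] [start] [start] = [] :=
      bfs_high grid [] [start] [start]
        (by intro x hx; rcases List.mem_singleton.mp hx with rfl; exact ⟨h, hg, by omega⟩)
    rw [hA, climb_unfold]
    rw [if_neg (show ¬(h < 9 ∧ ([start] : List (Int × Int)) ≠ []) from by
      intro ⟨h1, _⟩; omega), if_neg (by omega)]
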